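-- pv_equiv track=rewrite | github.com/value-driven-io/vai-studio-website | tourist-app/translation_analysis.py | categorize_keys_by_priority
-- ===== SOURCE A (Python) =====
-- from typing import Dict, List, Set, Any
--
-- def categorize_keys_by_priority(keys: List[str]) -> Dict[str, List[str]]:
--     """Categorize missing keys by priority based on their context"""
--     critical = []
--     important = []
--     minor = []
--
--     for key in keys:
--         key_lower = key.lower()
--
--         # Critical: Core functionality, navigation, errors
--         if any(term in key_lower for term in [
--             'common.', 'navigation.', 'error', 'booking', 'payment',
--             'form.', 'validation.', 'button', 'save', 'cancel', 'continue',
--             'loading', 'success', 'failed'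
--         ]):
--             critical.append(key)
--         # Important: User experience, tour details, status
--         elif any(term in key_lower for term in [
--             'tour', 'activity', 'status', 'detail', 'price', 'time',
--             'participant', 'requirement', 'inclusion', 'message'
--         ]):
--             important.append(key)
--         # Minor: Nice-to-have, descriptions, help text
--         else:
--             minor.append(key)
--
--     return {
--         'critical': sorted(critical),
--         'important': sorted(important),
--         'minor': sorted(minor)
--     }
-- ===== SOURCE B (Python) =====
-- CRITICAL_TERMS = [
--     'common.', 'navigation.', 'error', 'booking', 'payment',
--     'form.', 'validation.', 'button', 'save', 'cancel', 'continue',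
--     'loading', 'success', 'failed'
-- ]
--
-- IMPORTANT_TERMS = [
--     'tour', 'activity', 'status', 'detail', 'price', 'time',
--     'participant', 'requirement', 'inclusion', 'message'
-- ]
--
--
-- def _rank(key):
--     """0 = critical, 1 = important, 2 = minor."""
--     kl = key.lower()
--     if any(t in kl for t in CRITICAL_TERMS):
--         return 0
--     if any(t in kl for t in IMPORTANT_TERMS):
--         return 1
--     return 2
--
--
-- def categorize_keys_by_priority(keys):
--     ordered = sorted(keys)
--     return {
--         'critical': [k for k in ordered if _rank(k) == 0],
--         'important': [k for k in ordered if _rank(k) == 1],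
--         'minor': [k for k in ordered if _rank(k) == 2],
--     }
-- ===== Notes on version B (the rewrite author's own statement) =====
-- stated objective: simpler
-- what changed: B sorts the whole key list once up front and then builds each bucket as a comprehension filtering by a rank helper, instead of A's single append loop followed by three per-bucket sorts; stability of the sort makes the filtered buckets sorted.
import Mathlib
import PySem

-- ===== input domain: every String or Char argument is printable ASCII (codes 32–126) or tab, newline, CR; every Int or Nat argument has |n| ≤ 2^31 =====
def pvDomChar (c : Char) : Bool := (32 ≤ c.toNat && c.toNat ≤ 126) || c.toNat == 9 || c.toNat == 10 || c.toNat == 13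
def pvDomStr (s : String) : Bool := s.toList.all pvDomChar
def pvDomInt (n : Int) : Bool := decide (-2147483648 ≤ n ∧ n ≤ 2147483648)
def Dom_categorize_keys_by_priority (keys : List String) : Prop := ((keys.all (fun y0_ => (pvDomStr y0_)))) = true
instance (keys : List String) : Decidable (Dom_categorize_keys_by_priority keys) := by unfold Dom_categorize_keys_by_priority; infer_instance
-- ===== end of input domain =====

-- ===== PORT A =====
-- B sorts the key list once and filters by a rank helper instead of A's append loop plus three per-bucket sorts (objective: simpler).
def pvCritTerms : List String :=
  ["common.", "navigation.", "error", "booking", "payment",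
   "form.", "validation.", "button", "save", "cancel", "continue",
   "loading", "success", "failed"]

def pvImpTerms : List String :=
  ["tour", "activity", "status", "detail", "price", "time",
   "participant", "requirement", "inclusion", "message"]

-- any(term in kl for term in terms)
def pvAnyIn (terms : List String) (kl : String) : Bool :=
  terms.any (fun term => PySem.Str.isIn term kl)

def categorize_keys_by_priority (keys : List String) : List (String × List String) :=
  let st := keys.foldl
    (fun (acc : List String × List String × List String) key =>
      let key_lower := PySem.Str.lower key
      if pvAnyIn pvCritTerms key_lower then
        (acc.1 ++ [key], acc.2.1, acc.2.2)
      else if pvAnyIn pvImpTerms key_lower then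
        (acc.1, acc.2.1 ++ [key], acc.2.2)
      else
        (acc.1, acc.2.1, acc.2.2 ++ [key]))
    ([], [], [])
  [("critical", PySem.List.sorted st.1 (fun x => x) false),
   ("important", PySem.List.sorted st.2.1 (fun x => x) false),
   ("minor", PySem.List.sorted st.2.2 (fun x => x) false)]

-- ===== PORT B =====
-- _rank: 0 = critical, 1 = important, 2 = minor
def pvRank (key : String) : Nat :=
  let kl := PySem.Str.lower key
  if pvAnyIn pvCritTerms kl then 0
  else if pvAnyIn pvImpTerms kl then 1
  else 2

def categorize_keys_by_priority_alt (keys : List String) : List (String × List String) :=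
  let ordered := PySem.List.sorted keys (fun x => x) false
  [("critical", ordered.filter (fun k => pvRank k == 0)),
   ("important", ordered.filter (fun k => pvRank k == 1)),
   ("minor", ordered.filter (fun k => pvRank k == 2))]

-- ===== PRECONDITION & SPEC =====
def Spec_categorize_keys_by_priority (keys : List String) (out : List (String × List String)) : Prop := out = categorize_keys_by_priority_alt keys
instance (keys : List String) (out : List (String × List String)) : Decidable (Spec_categorize_keys_by_priority keys out) := by unfold Spec_categorize_keys_by_priority; infer_instance

-- ===== CLAIM (what is proved, stated in full; the proofs are below) =====
def Claim_equal_categorize_keys_by_priority : Prop := ∀ (keys : List String), Dom_categorize_keys_by_priority keys → Spec_categorize_keys_by_priority keys (categorize_keys_by_priority keys)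

-- ===== LEMMAS AND PROOFS =====

-- A's loop computes the three rank-filters of the input list (appended to the accumulators).
theorem pvFoldl_eq_filters (keys : List String) (a b c : List String) :
    keys.foldl
      (fun (acc : List String × List String × List String) key =>
        let key_lower := PySem.Str.lower key
        if pvAnyIn pvCritTerms key_lower then
          (acc.1 ++ [key], acc.2.1, acc.2.2)
        else if pvAnyIn pvImpTerms key_lower then
          (acc.1, acc.2.1 ++ [key], acc.2.2)
        else
          (acc.1, acc.2.1, acc.2.2 ++ [key]))
      (a, b, c)
    = (a ++ keys.filter (fun k => pvRank k == 0),
       b ++ keys.filter (fun k => pvRank k == 1),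
       c ++ keys.filter (fun k => pvRank k == 2)) := by
  induction keys generalizing a b c with
  | nil => simp
  | cons k t ih =>
    simp only [List.foldl_cons, List.filter_cons]
    by_cases h1 : pvAnyIn pvCritTerms (PySem.Str.lower k) = true
    · simp [pvRank, h1, ih]
    · by_cases h2 : pvAnyIn pvImpTerms (PySem.Str.lower k) = true
      · simp [pvRank, h1, h2, ih]
      · simp [pvRank, h1, h2, ih]

-- the stable sort commutes with filter: sorting a filtered list = filtering the sorted list
theorem pvSorted_filter (xs : List String) (p : String → Bool) :
    PySem.List.sorted (xs.filter p) (fun x => x) false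
      = (PySem.List.sorted xs (fun x => x) false).filter p := by
  apply PySem.List.sorted_id_eq_of_perm_of_pairwise
  · exact (PySem.List.sorted_perm xs (fun x => x) false).filter p
  · exact (PySem.List.sorted_pairwise xs (fun x => x)).filter p

-- ===== VERDICT (by name: the statement is the Claim_ definition above) =====
theorem categorize_keys_by_priority_spec : Claim_equal_categorize_keys_by_priority := by
  intro keys _
  show categorize_keys_by_priority keys = categorize_keys_by_priority_alt keys
  simp only [categorize_keys_by_priority, categorize_keys_by_priority_alt,
    pvFoldl_eq_filters, List.nil_append, pvSorted_filter]
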